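-- pv_equiv track=rewrite | github.com/VV123/NLIDB_gradient | decode_helper.py | __switch_cond
-- ===== SOURCE A (Python) =====
-- def __switch_cond(q1, q2):
--     if 'where' not in q1 or 'where' not in q2:
--         return False
--     q1 = ' '.join(q1.split())
--     q2 = ' '.join(q2.split())
--     prefix1 = q1[:q1.index('where') + 5]
--     prefix1 = ' '.join(prefix1.split())
--     q1 = q1[q1.index('where') + 5: ]
--     prefix2 = q2[:q2.index('where') + 5]
--     prefix2 = ' '.join(prefix2.split())
--     if prefix1 != prefix2:
--         return False
--     q2 = q2[q2.index('where') + 5: ]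
--     conds1 = q1.split(' and ')
--     conds2 = q2.split(' and ')
--     conds1 = [ ' '.join(cond.split()) for cond in conds1]
--     conds2 = [ ' '.join(cond.split()) for cond in conds2]
--     conds1 = sorted(conds1, key=lambda x : x)
--     conds2 = sorted(conds2, key=lambda x : x)
--     return conds1 == conds2
-- ===== SOURCE B (Python) =====
-- from collections import Counter
--
--
-- def _canon(q):
--     # canonical form of one query: (normalized prefix through 'where', multiset of normalized conditions)
--     q = ' '.join(q.split())
--     cut = q.index('where') + 5
--     prefix = ' '.join(q[:cut].split())
--     conds = Counter(' '.join(c.split()) for c in q[cut:].split(' and '))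
--     return prefix, conds
--
--
-- def __switch_cond(q1, q2):
--     if 'where' not in q1 or 'where' not in q2:
--         return False
--     return _canon(q1) == _canon(q2)
-- ===== Notes on version B (the rewrite author's own statement) =====
-- stated objective: idiomatic
-- what changed: B canonicalizes each query once into (normalized prefix, Counter multiset of normalized conditions) via a helper and compares the two canonical forms, instead of A's inline short-circuit pipeline that sorts both condition lists and compares the sorted lists.
import Mathlib
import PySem

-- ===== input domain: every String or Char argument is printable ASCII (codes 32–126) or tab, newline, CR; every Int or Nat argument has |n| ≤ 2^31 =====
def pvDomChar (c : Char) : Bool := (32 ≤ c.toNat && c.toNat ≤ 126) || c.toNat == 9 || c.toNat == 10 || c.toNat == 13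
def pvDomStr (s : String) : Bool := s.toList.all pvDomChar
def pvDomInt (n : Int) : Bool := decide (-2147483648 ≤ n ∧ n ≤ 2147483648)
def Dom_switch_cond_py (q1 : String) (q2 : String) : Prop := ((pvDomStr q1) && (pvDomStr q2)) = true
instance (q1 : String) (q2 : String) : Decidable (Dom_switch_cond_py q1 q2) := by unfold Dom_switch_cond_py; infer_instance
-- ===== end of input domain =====

-- B replaces A's sort-both-condition-lists-and-compare by a per-query canonical form
-- (prefix, Counter of normalized conditions) compared directly; objective: idiomatic (order-independent multiset comparison, no sort).

-- ' '.join(s.split()) — whitespace normalization, used verbatim by both Pythons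
def pvNorm (s : String) : String := PySem.Str.join " " (PySem.Str.split₀ s)

-- ===== PORT A =====
def switch_cond_py (q1 : String) (q2 : String) : Bool :=
  if !(PySem.Str.isIn "where" q1) || !(PySem.Str.isIn "where" q2) then false
  else
    let q1n := pvNorm q1
    let q2n := pvNorm q2
    let prefix1 := pvNorm (PySem.Str.slice q1n none (some (PySem.Str.find q1n "where" + 5)))
    let q1r := PySem.Str.slice q1n (some (PySem.Str.find q1n "where" + 5)) none
    let prefix2 := pvNorm (PySem.Str.slice q2n none (some (PySem.Str.find q2n "where" + 5)))
    if prefix1 != prefix2 then false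
    else
      let q2r := PySem.Str.slice q2n (some (PySem.Str.find q2n "where" + 5)) none
      -- split(' and '): separator is a nonempty literal, so split? is always some
      let conds1 := ((PySem.Str.split? q1r " and ").getD []).map pvNorm
      let conds2 := ((PySem.Str.split? q2r " and ").getD []).map pvNorm
      decide (PySem.List.sorted conds1 (fun x => x) false = PySem.List.sorted conds2 (fun x => x) false)

-- ===== PORT B =====
-- _canon(q): (normalized prefix through 'where', Counter of the normalized conditions)
def pvCanon (q : String) : String × PySem.Dict String Int :=
  let qn := pvNorm q
  let cut := PySem.Str.find qn "where" + 5
  let pre := pvNorm (PySem.Str.slice qn none (some cut))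
  let conds := PySem.Dict.counter (((PySem.Str.split? (PySem.Str.slice qn (some cut) none) " and ").getD []).map pvNorm)
  (pre, conds)

-- Python's '==' on dicts: same key set and same value at every key (insertion order ignored)
def pvDictEq (d1 d2 : PySem.Dict String Int) : Bool :=
  PySem.Set.equal d1.keys d2.keys && d1.keys.all (fun k => d1.getD k 0 == d2.getD k 0)

def switch_cond_py_alt (q1 : String) (q2 : String) : Bool :=
  if !(PySem.Str.isIn "where" q1) || !(PySem.Str.isIn "where" q2) then false
  else
    let c1 := pvCanon q1
    let c2 := pvCanon q2
    (c1.1 == c2.1) && pvDictEq c1.2 c2.2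

-- ===== PRECONDITION & SPEC =====
def Spec_switch_cond_py (q1 : String) (q2 : String) (out : Bool) : Prop := out = switch_cond_py_alt q1 q2
instance (q1 : String) (q2 : String) (out : Bool) : Decidable (Spec_switch_cond_py q1 q2 out) := by unfold Spec_switch_cond_py; infer_instance

-- ===== CLAIM (what is proved, stated in full; the proofs are below) =====
def Claim_equal_switch_cond_py : Prop := ∀ (q1 : String) (q2 : String), Dom_switch_cond_py q1 q2 → Spec_switch_cond_py q1 q2 (switch_cond_py q1 q2)

-- ===== LEMMAS AND PROOFS =====

-- Counter(l1) == Counter(l2) (Python dict equality) decides the permutation relation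
theorem pvDictEq_counter_iff_perm (l1 l2 : List String) :
    pvDictEq (PySem.Dict.counter l1) (PySem.Dict.counter l2) = true ↔ l1.Perm l2 := by
  rw [List.perm_iff_count]
  unfold pvDictEq
  rw [Bool.and_eq_true, PySem.Dict.keys_counter, PySem.Dict.keys_counter,
      PySem.Set.equal_iff, List.all_eq_true]
  constructor
  · rintro ⟨hmem, hval⟩ a
    have hmem' : ∀ x, x ∈ l1 ↔ x ∈ l2 := by
      simpa only [PySem.Set.mem_ofList] using hmem
    by_cases ha : a ∈ l1
    · have := hval a (by rw [PySem.Set.mem_ofList]; exact ha)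
      rw [beq_iff_eq, PySem.Dict.getD_counter, PySem.Dict.getD_counter] at this
      exact_mod_cast this
    · have ha2 : a ∉ l2 := fun h => ha ((hmem' a).mpr h)
      rw [List.count_eq_zero_of_not_mem ha, List.count_eq_zero_of_not_mem ha2]
  · intro h
    constructor
    · intro x
      rw [PySem.Set.mem_ofList, PySem.Set.mem_ofList, ← List.count_pos_iff, ← List.count_pos_iff, h x]
    · intro k _
      rw [beq_iff_eq, PySem.Dict.getD_counter, PySem.Dict.getD_counter, h k]

-- the two final comparisons agree: sorted lists equal iff Counters equal
theorem pv_sorted_eq_iff_dictEq (l1 l2 : List String) :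
    decide (PySem.List.sorted l1 (fun x => x) false = PySem.List.sorted l2 (fun x => x) false)
      = pvDictEq (PySem.Dict.counter l1) (PySem.Dict.counter l2) := by
  rw [Bool.eq_iff_iff, decide_eq_true_iff, PySem.List.sorted_id_eq_sorted_id_iff_perm,
      pvDictEq_counter_iff_perm]

-- the post-guard bodies agree, for any prefixes and condition lists
theorem pv_body_eq (p1 p2 : String) (c1 c2 : List String) :
    (if (p1 != p2) = true then false
     else decide (PySem.List.sorted c1 (fun x => x) false = PySem.List.sorted c2 (fun x => x) false))
      = ((p1 == p2) && pvDictEq (PySem.Dict.counter c1) (PySem.Dict.counter c2)) := by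
  by_cases hp : p1 = p2
  · subst hp
    simp only [bne_self_eq_false, Bool.false_eq_true, if_false, beq_self_eq_true, Bool.true_and]
    exact pv_sorted_eq_iff_dictEq c1 c2
  · simp [bne_iff_ne, hp]

-- ===== VERDICT (by name: the statement is the Claim_ definition above) =====
theorem switch_cond_py_spec : Claim_equal_switch_cond_py := by
  intro q1 q2 _
  unfold Spec_switch_cond_py switch_cond_py switch_cond_py_alt pvCanon
  by_cases hg : (!(PySem.Str.isIn "where" q1) || !(PySem.Str.isIn "where" q2)) = true
  · rw [if_pos hg, if_pos hg]
  · rw [if_neg hg, if_neg hg]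
    simp only [pv_body_eq]
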